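-- pv_equiv track=rewrite | github.com/molly/follow-the-crypto-backend | candidate_trim.py | move_inactive_candidates_to_end
-- ===== SOURCE A (Python) =====
-- def move_inactive_candidates_to_end(candidate_list):
--     active = []
--     inactive = []
--     for candidate in candidate_list:
--         if candidate.get("withdrawn") or candidate.get("declined"):
--             inactive.append(candidate)
--         else:
--             active.append(candidate)
--     return active + inactive
-- ===== SOURCE B (Python) =====
-- def move_inactive_candidates_to_end(candidate_list):
--     return sorted(
--         candidate_list,
--         key=lambda c: bool(c.get("withdrawn") or c.get("declined")),
--     )
-- ===== Notes on version B (the rewrite author's own statement) =====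
-- stated objective: idiomatic
-- what changed: Replaces the explicit two-bucket partition loop (active/inactive lists appended and concatenated) with a single stable sort over a boolean key; stability groups active before inactive while preserving relative order.
import Mathlib
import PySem

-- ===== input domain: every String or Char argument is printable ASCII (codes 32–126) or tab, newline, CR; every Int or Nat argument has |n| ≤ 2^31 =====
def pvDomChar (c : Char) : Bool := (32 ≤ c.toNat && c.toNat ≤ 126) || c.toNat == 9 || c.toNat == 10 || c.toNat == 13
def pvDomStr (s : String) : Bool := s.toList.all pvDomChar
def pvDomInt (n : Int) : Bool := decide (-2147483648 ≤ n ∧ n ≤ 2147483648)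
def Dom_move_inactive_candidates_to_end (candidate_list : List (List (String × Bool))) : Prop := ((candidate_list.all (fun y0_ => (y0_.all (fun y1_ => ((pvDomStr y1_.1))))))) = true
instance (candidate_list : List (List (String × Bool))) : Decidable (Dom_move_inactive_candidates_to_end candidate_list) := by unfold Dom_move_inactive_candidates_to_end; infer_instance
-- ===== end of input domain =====

-- B replaces A's explicit two-bucket partition loop with one stable sort over a
-- boolean key (idiomatic; same return value, no speed claim).

-- truthiness of `c.get("withdrawn") or c.get("declined")` (dict.get default None is falsy)
def pvInactive (c : List (String × Bool)) : Bool :=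
  ((PySem.Dict.mk c).get? "withdrawn").getD false || ((PySem.Dict.mk c).get? "declined").getD false

-- ===== PORT A =====
def move_inactive_candidates_to_end (candidate_list : List (List (String × Bool))) : List (List (String × Bool)) :=
  let p := candidate_list.foldl
    (fun acc candidate =>
      if pvInactive candidate then (acc.1, acc.2 ++ [candidate]) else (acc.1 ++ [candidate], acc.2))
    ([], [])
  p.1 ++ p.2

-- ===== PORT B =====
def move_inactive_candidates_to_end_alt (candidate_list : List (List (String × Bool))) : List (List (String × Bool)) :=
  PySem.List.sorted candidate_list (fun c => pvInactive c) false

-- ===== PRECONDITION & SPEC =====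
def Spec_move_inactive_candidates_to_end (candidate_list : List (List (String × Bool))) (out : List (List (String × Bool))) : Prop := out = move_inactive_candidates_to_end_alt candidate_list
instance (candidate_list : List (List (String × Bool))) (out : List (List (String × Bool))) : Decidable (Spec_move_inactive_candidates_to_end candidate_list out) := by unfold Spec_move_inactive_candidates_to_end; infer_instance

-- ===== CLAIM (what is proved, stated in full; the proofs are below) =====
def Claim_equal_move_inactive_candidates_to_end : Prop := ∀ (candidate_list : List (List (String × Bool))), Dom_move_inactive_candidates_to_end candidate_list → Spec_move_inactive_candidates_to_end candidate_list (move_inactive_candidates_to_end candidate_list)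

-- ===== LEMMAS AND PROOFS =====

-- inserting an active (key false) element into "actives ++ inactives" puts it
-- at the end of the actives; the stable insertion sort is exactly A's partition.
theorem insertBy_partition_false {α : Type} (key : α → Bool) (x : α) (a i : List α)
    (ha : ∀ y ∈ a, key y = false) (hi : ∀ y ∈ i, key y = true) (hx : key x = false) :
    PySem.List.insertBy (fun p q => decide (key p < key q)) x (a ++ i) = (a ++ [x]) ++ i := by
  induction a with
  | nil =>
    cases i with
    | nil => simp [PySem.List.insertBy]
    | cons h t =>
      have : key h = true := hi h (by simp)
      simp [PySem.List.insertBy, hx, this]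
  | cons h t ih =>
    have hh : key h = false := ha h (by simp)
    simp only [List.cons_append, PySem.List.insertBy, hx, hh]
    simp [ih (fun y hy => ha y (by simp [hy]))]

theorem insertBy_partition_true {α : Type} (key : α → Bool) (x : α) (l : List α)
    (hx : key x = true) :
    PySem.List.insertBy (fun p q => decide (key p < key q)) x l = l ++ [x] := by
  induction l with
  | nil => simp [PySem.List.insertBy]
  | cons h t ih =>
    simp only [PySem.List.insertBy, hx]
    have : ¬ (key x < key h) := by simp [hx, Bool.lt_iff]
    simp [ih]

theorem partition_loop_eq (key : List (String × Bool) → Bool)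
    (xs : List (List (String × Bool))) :
    ∀ (a i : List (List (String × Bool))),
      (∀ y ∈ a, key y = false) → (∀ y ∈ i, key y = true) →
      xs.foldl (fun acc x => PySem.List.insertBy (fun p q => decide (key p < key q)) x acc) (a ++ i)
      = (xs.foldl (fun acc c => if key c then (acc.1, acc.2 ++ [c]) else (acc.1 ++ [c], acc.2)) (a, i)).1
        ++ (xs.foldl (fun acc c => if key c then (acc.1, acc.2 ++ [c]) else (acc.1 ++ [c], acc.2)) (a, i)).2 := by
  induction xs with
  | nil => intro a i _ _; simp
  | cons x t ih =>
    intro a i ha hi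
    by_cases hx : key x = true
    · have h1 := insertBy_partition_true key x (a ++ i) hx
      have hi' : ∀ y ∈ i ++ [x], key y = true := by
        intro y hy
        rcases List.mem_append.mp hy with h | h
        · exact hi y h
        · simp at h; simpa [h] using hx
      simp only [List.foldl_cons, hx, h1, List.append_assoc]
      exact ih a (i ++ [x]) ha hi'
    · have hx' : key x = false := by simpa using hx
      have ha' : ∀ y ∈ a ++ [x], key y = false := by
        intro y hy
        rcases List.mem_append.mp hy with h | h
        · exact ha y h
        · simp at h; simpa [h] using hx'
      have h1 := insertBy_partition_false key x a i ha hi hx'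
      simp only [List.foldl_cons, hx', Bool.false_eq_true, if_false, h1]
      exact ih (a ++ [x]) i ha' hi

-- ===== VERDICT (by name: the statement is the Claim_ definition above) =====
theorem move_inactive_candidates_to_end_spec : Claim_equal_move_inactive_candidates_to_end := by
  intro xs _
  show move_inactive_candidates_to_end xs = move_inactive_candidates_to_end_alt xs
  unfold move_inactive_candidates_to_end move_inactive_candidates_to_end_alt
  rw [PySem.List.sorted_eq_foldl_insertBy]
  have := partition_loop_eq pvInactive xs [] [] (by simp) (by simp)
  simpa using this.symm
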